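-- pv_equiv track=rewrite | github.com/matthewmamelak/speechAnaylsis | SpeechAnalysis.py | textMarkup
-- ===== SOURCE A (Python) =====
-- def textMarkup(listOfStrings):
--     """The function textMarkup makes all uppercase letters to lower case.
--     It also replaces all double spaces, hypens and linefeeds with a single space."""
--     stringFix = " "
--     stringHypen = listOfStrings.replace("-", " ") #Replaces a hypen with a space
--     stringSpace = stringHypen.replace("\n", " ") #Replaces a new line feed with a space
--     for a in stringSpace:
--         if a.isalpha() or a == " ":
--             stringFix = stringFix + a
--     lowerCase = stringFix.lower() #Makes all words lowercase
--     while lowerCase.count("  ") > 0: #Replaces a double space with a single space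
--         lowerCase = lowerCase.replace("  ", " ")
--     return lowerCase
-- ===== SOURCE B (Python) =====
-- def textMarkup(listOfStrings):
--     """Single pass: keep letters (lowercased) and spaces (hyphen/newline count
--     as spaces), emitting at most one space in a row, seeded with one space."""
--     out = [" "]
--     prev_space = True
--     for ch in listOfStrings:
--         if ch.isalpha():
--             out.append(ch.lower())
--             prev_space = False
--         elif ch in " -\n":
--             if not prev_space:
--                 out.append(" ")
--             prev_space = True
--     return "".join(out)
-- ===== Notes on version B (the rewrite author's own statement) =====
-- stated objective: alternative
-- what changed: Replaces A's two replace passes, character-append filter loop and repeated double-space-collapse replace loop by one stateful pass with a prev_space flag building a list joined once.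
import Mathlib
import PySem

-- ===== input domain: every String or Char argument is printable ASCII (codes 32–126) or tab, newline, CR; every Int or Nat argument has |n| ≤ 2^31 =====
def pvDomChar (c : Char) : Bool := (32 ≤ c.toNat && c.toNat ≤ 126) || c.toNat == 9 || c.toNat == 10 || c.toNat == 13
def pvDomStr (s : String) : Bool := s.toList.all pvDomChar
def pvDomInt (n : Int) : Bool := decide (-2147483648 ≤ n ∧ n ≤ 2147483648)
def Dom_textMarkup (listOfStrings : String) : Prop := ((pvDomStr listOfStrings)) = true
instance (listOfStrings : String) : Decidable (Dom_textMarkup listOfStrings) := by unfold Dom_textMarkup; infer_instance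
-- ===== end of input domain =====

-- B replaces A's two replace passes, char-append filter loop and repeated
-- replace("  "," ") collapse loop by one stateful pass with a prev_space flag.

-- ===== PORT A =====

-- structural counterparts of the fueled PySem.Chars.count / replace on pattern "  ":
-- the while loop's termination proof (decreasing_by) cites them, so they live above the port
def cnt2 : List Char → Nat
  | ' ' :: ' ' :: t => 1 + cnt2 t
  | _ :: t => cnt2 t
  | [] => 0

def rep2 : List Char → List Char
  | ' ' :: ' ' :: t => ' ' :: rep2 t
  | c :: t => c :: rep2 t
  | [] => []

theorem cnt2_two (t : List Char) : cnt2 (' ' :: ' ' :: t) = 1 + cnt2 t := by rw [cnt2]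

theorem rep2_two (t : List Char) : rep2 (' ' :: ' ' :: t) = ' ' :: rep2 t := by rw [rep2]

theorem cnt2_cons_ne (c : Char) (t : List Char)
    (h : c ≠ ' ' ∨ t.head? ≠ some ' ') : cnt2 (c :: t) = cnt2 t := by
  rw [cnt2.eq_def]
  split
  · rename_i heq; injection heq with h1 h2; subst h1; subst h2; simp at h
  · rename_i heq; injection heq with h1 h2; subst h2; rfl
  · rename_i heq; simp at heq

theorem rep2_cons_ne (c : Char) (t : List Char)
    (h : c ≠ ' ' ∨ t.head? ≠ some ' ') : rep2 (c :: t) = c :: rep2 t := by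
  rw [rep2.eq_def]
  split
  · rename_i heq; injection heq with h1 h2; subst h1; subst h2; simp at h
  · rename_i heq; injection heq with h1 h2; subst h1; subst h2; rfl
  · rename_i heq; simp at heq

theorem not_prefix_two (c : Char) (t : List Char)
    (hp : ¬ [' ', ' '].isPrefixOf (c :: t) = true) : c ≠ ' ' ∨ t.head? ≠ some ' ' := by
  by_contra h
  push_neg at h
  obtain ⟨hc, ht⟩ := h
  subst hc
  rcases t with _ | ⟨c', t'⟩
  · simp at ht
  · simp at ht; subst ht; simp [List.isPrefixOf] at hp

theorem prefix_two_shape (c : Char) (t : List Char)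
    (hp : [' ', ' '].isPrefixOf (c :: t) = true) : c = ' ' ∧ ∃ t', t = ' ' :: t' := by
  rcases t with _ | ⟨c', t'⟩
  · simp [List.isPrefixOf] at hp
  · simp [List.isPrefixOf] at hp
    exact ⟨hp.1.symm, t', by rw [← hp.2]⟩

theorem guard_ne (c : Char) (t : List Char)
    (h : ∀ t', c = ' ' → t = ' ' :: t' → False) : c ≠ ' ' ∨ t.head? ≠ some ' ' := by
  by_contra hcon
  push_neg at hcon
  obtain ⟨hc, ht⟩ := hcon
  rcases t with _ | ⟨c', t'⟩
  · simp at ht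
  · simp at ht; subst ht; exact h t' hc rfl

theorem count_go_eq_cnt2 (fuel : Nat) :
    ∀ (l : List Char) (acc : Nat), l.length ≤ fuel →
    PySem.Chars.count.go [' ', ' '] fuel l acc = acc + cnt2 l := by
  induction fuel with
  | zero =>
    intro l acc h
    have : l = [] := List.eq_nil_of_length_eq_zero (Nat.le_zero.mp h)
    subst this; simp [PySem.Chars.count.go, cnt2]
  | succ n ih =>
    intro l acc h
    match l with
    | [] => simp [PySem.Chars.count.go, cnt2]
    | c :: t =>
      by_cases hp : [' ', ' '].isPrefixOf (c :: t) = true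
      · obtain ⟨hc, t', ht⟩ := prefix_two_shape c t hp
        subst hc; subst ht
        rw [PySem.Chars.count.go]
        rw [if_pos hp]
        simp only [List.length_cons] at h
        rw [ih _ _ (by simp; omega)]
        simp only [List.length_cons, List.length_nil, List.drop_succ_cons, List.drop_zero]
        rw [cnt2_two]; omega
      · rw [PySem.Chars.count.go]
        rw [if_neg hp]
        simp only [List.length_cons] at h
        rw [ih t acc (by omega)]
        rw [cnt2_cons_ne c t (not_prefix_two c t hp)]

theorem count2_eq_cnt2 (l : List Char) :
    PySem.Chars.count l [' ', ' '] = cnt2 l := by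
  rw [PySem.Chars.count]
  simp only [List.isEmpty, Bool.false_eq_true, if_neg, not_false_iff]
  simpa using count_go_eq_cnt2 l.length l 0 (Nat.le_refl _)

theorem replace_go_eq_rep2 (fuel : Nat) :
    ∀ (l acc : List Char), l.length ≤ fuel →
    PySem.Chars.replace.go [' ', ' '] [' '] fuel l acc = acc.reverse ++ rep2 l := by
  induction fuel with
  | zero =>
    intro l acc h
    have : l = [] := List.eq_nil_of_length_eq_zero (Nat.le_zero.mp h)
    subst this; simp [PySem.Chars.replace.go, rep2]
  | succ n ih =>
    intro l acc h
    match l with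
    | [] => simp [PySem.Chars.replace.go, rep2]
    | c :: t =>
      by_cases hp : [' ', ' '].isPrefixOf (c :: t) = true
      · obtain ⟨hc, t', ht⟩ := prefix_two_shape c t hp
        subst hc; subst ht
        rw [PySem.Chars.replace.go]
        rw [if_pos hp]
        simp only [List.length_cons] at h
        rw [ih _ _ (by simp; omega)]
        rw [rep2_two]; simp
      · rw [PySem.Chars.replace.go]
        rw [if_neg hp]
        simp only [List.length_cons] at h
        rw [ih t (c :: acc) (by omega)]
        rw [rep2_cons_ne c t (not_prefix_two c t hp)]
        simp

theorem replace2_eq_rep2 (l : List Char) :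
    PySem.Chars.replace l [' ', ' '] [' '] = rep2 l := by
  rw [PySem.Chars.replace]
  simp only [List.isEmpty, Bool.false_eq_true, if_neg, not_false_iff]
  simpa using replace_go_eq_rep2 l.length l [] (Nat.le_refl _)

theorem len_rep2_add_cnt2 (l : List Char) : (rep2 l).length + cnt2 l = l.length := by
  induction l using rep2.induct with
  | case1 t ih => rw [rep2_two, cnt2_two]; simp at ih ⊢; omega
  | case2 c t hne ih =>
    rw [rep2_cons_ne c t (guard_ne c t hne), cnt2_cons_ne c t (guard_ne c t hne)]
    simp at ih ⊢; omega
  | case3 => rfl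

theorem len_rep2_of_cnt2_pos (l : List Char) (h : 0 < cnt2 l) :
    (rep2 l).length < l.length := by
  have := len_rep2_add_cnt2 l; omega

-- A's while loop: replace "  " by " " until no double space remains
def collapseLoop (l : List Char) : List Char :=
  if 0 < PySem.Chars.count l [' ', ' '] then
    collapseLoop (PySem.Chars.replace l [' ', ' '] [' '])
  else l
termination_by l.length
decreasing_by
  rename_i h
  rw [count2_eq_cnt2] at h
  rw [replace2_eq_rep2]
  exact len_rep2_of_cnt2_pos l h

def textMarkup (listOfStrings : String) : String :=
  let stringHypen := PySem.Chars.replace listOfStrings.toList ['-'] [' ']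
  let stringSpace := PySem.Chars.replace stringHypen ['\n'] [' ']
  let stringFix := stringSpace.foldl
    (fun acc a => if PySem.Chars.isalpha a || a == ' ' then acc ++ [a] else acc) [' ']
  let lowerCase := PySem.Chars.lower stringFix
  String.mk (collapseLoop lowerCase)

-- ===== PORT B =====
def textMarkup_alt (listOfStrings : String) : String :=
  let st := listOfStrings.toList.foldl
    (fun (st : List Char × Bool) ch =>
      if PySem.Chars.isalpha ch then (st.1 ++ [PySem.Chars.lowerChar ch], false)
      else if ch == ' ' || ch == '-' || ch == '\n' then
        (if st.2 then st.1 else st.1 ++ [' '], true)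
      else st)
    ([' '], true)
  String.mk st.1

-- ===== PRECONDITION & SPEC =====
def Spec_textMarkup (listOfStrings : String) (out : String) : Prop := out = textMarkup_alt listOfStrings
instance (listOfStrings : String) (out : String) : Decidable (Spec_textMarkup listOfStrings out) := by unfold Spec_textMarkup; infer_instance

-- ===== CLAIM (what is proved, stated in full; the proofs are below) =====
def Claim_equal_textMarkup : Prop := ∀ (listOfStrings : String), Dom_textMarkup listOfStrings → Spec_textMarkup listOfStrings (textMarkup listOfStrings)

-- ===== LEMMAS AND PROOFS =====

-- space-squeezing as a left-to-right flag machine (b = "last emitted char was a space")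
def sqz : Bool → List Char → List Char
  | _, [] => []
  | b, c :: t =>
    if c = ' ' then (if b then sqz true t else ' ' :: sqz true t) else c :: sqz false t

theorem sqz_true_eq_false_of_head_ne (t : List Char) (h : t.head? ≠ some ' ') :
    sqz true t = sqz false t := by
  match t with
  | [] => rfl
  | c :: t' =>
    have hc : c ≠ ' ' := by intro hc; subst hc; simp at h
    simp [sqz, hc]

theorem sqz_false_of_cnt2_zero (l : List Char) (h : cnt2 l = 0) : sqz false l = l := by
  induction l with
  | nil => rfl
  | cons c t ih =>
    by_cases hc : c = ' '
    · subst hc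
      have hhead : t.head? ≠ some ' ' := by
        rcases t with _ | ⟨c', t'⟩
        · simp
        · intro hh; simp at hh; subst hh
          rw [cnt2_two] at h; omega
      rw [cnt2_cons_ne ' ' t (Or.inr hhead)] at h
      simp [sqz, sqz_true_eq_false_of_head_ne t hhead, ih h]
    · rw [cnt2_cons_ne c t (Or.inl hc)] at h
      simp [sqz, hc, ih h]

theorem sqz_rep2 (l : List Char) : ∀ b, sqz b (rep2 l) = sqz b l := by
  induction l using rep2.induct with
  | case1 t ih =>
    intro b
    rw [rep2_two]
    by_cases hb : b = true <;> simp_all [sqz]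
  | case2 c t hne ih =>
    intro b
    rw [rep2_cons_ne c t (guard_ne c t hne)]
    by_cases hc : c = ' '
    · subst hc
      have hhead : t.head? ≠ some ' ' := by
        rcases guard_ne ' ' t hne with h | h
        · exact absurd rfl h
        · exact h
      by_cases hb : b = true <;>
        simp_all [sqz, sqz_true_eq_false_of_head_ne]
    · simp [sqz, hc, ih]
  | case3 => intro b; rfl

theorem collapseLoop_eq_sqz (l : List Char) : collapseLoop l = sqz false l := by
  induction l using collapseLoop.induct with
  | case1 l h ih =>
    rw [collapseLoop, if_pos h, ih, replace2_eq_rep2, sqz_rep2]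
  | case2 l h =>
    rw [collapseLoop, if_neg h]
    rw [count2_eq_cnt2] at h
    exact (sqz_false_of_cnt2_zero l (by omega)).symm

-- single-character replace is a map
theorem replace_go_single (a b : Char) (fuel : Nat) :
    ∀ (l acc : List Char), l.length ≤ fuel →
    PySem.Chars.replace.go [a] [b] fuel l acc
      = acc.reverse ++ l.map (fun x => if x = a then b else x) := by
  induction fuel with
  | zero =>
    intro l acc h
    have : l = [] := List.eq_nil_of_length_eq_zero (Nat.le_zero.mp h)
    subst this; simp [PySem.Chars.replace.go]
  | succ n ih =>
    intro l acc h
    match l with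
    | [] => simp [PySem.Chars.replace.go]
    | c :: t =>
      rw [PySem.Chars.replace.go]
      simp only [List.length_cons] at h
      by_cases hc : c = a
      · subst hc
        have hpre : [c].isPrefixOf (c :: t) = true := by simp [List.isPrefixOf]
        rw [if_pos hpre]
        rw [ih _ _ (by simp; omega)]
        simp
      · have hpre : ¬ ([a].isPrefixOf (c :: t) = true) := by
          simp [List.isPrefixOf]; exact fun h' => absurd h'.symm hc
        rw [if_neg hpre]
        rw [ih t _ (by omega)]
        simp [hc]

theorem replace_single (a b : Char) (l : List Char) :
    PySem.Chars.replace l [a] [b] = l.map (fun x => if x = a then b else x) := by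
  rw [PySem.Chars.replace]
  simp only [List.isEmpty, Bool.false_eq_true, if_neg, not_false_iff]
  simpa using replace_go_single a b l.length l [] (Nat.le_refl _)

-- character-class facts
theorem isalpha_ne_space {c : Char} (h : PySem.Chars.isalpha c = true) : c ≠ ' ' := by
  intro hc; subst hc
  simp [PySem.Chars.isalpha, PySem.Chars.isupper, PySem.Chars.islower, Char.le_def] at h

theorem isalpha_ne_hyphen {c : Char} (h : PySem.Chars.isalpha c = true) : c ≠ '-' := by
  intro hc; subst hc
  simp [PySem.Chars.isalpha, PySem.Chars.isupper, PySem.Chars.islower, Char.le_def] at h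

theorem isalpha_ne_newline {c : Char} (h : PySem.Chars.isalpha c = true) : c ≠ '\n' := by
  intro hc; subst hc
  simp [PySem.Chars.isalpha, PySem.Chars.isupper, PySem.Chars.islower, Char.le_def] at h

theorem lowerChar_ne_space {c : Char} (h : PySem.Chars.isalpha c = true) :
    PySem.Chars.lowerChar c ≠ ' ' := by
  rw [PySem.Chars.lowerChar]
  by_cases hu : PySem.Chars.isupper c = true
  · rw [if_pos hu]
    simp [PySem.Chars.isupper, Char.le_def] at hu
    intro hcontra
    have hv1 : 65 ≤ c.toNat := UInt32.le_iff_toNat_le.mp hu.1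
    have hv2 : c.toNat ≤ 90 := UInt32.le_iff_toNat_le.mp hu.2
    have h32 : (Char.ofNat (c.toNat + 32)).toNat = 32 := by rw [hcontra]; rfl
    rw [Char.toNat_ofNat, if_pos (Or.inl (by omega))] at h32
    omega
  · rw [if_neg hu]
    exact isalpha_ne_space h

-- the hyphen/newline-normalised, filtered, lowered character stream
def pvH (c : Char) : Char := if c = '-' ∨ c = '\n' then ' ' else c

def pvL (l : List Char) : List Char :=
  PySem.Chars.lower ((l.map pvH).filter (fun a => PySem.Chars.isalpha a || a == ' '))

theorem pvL_cons (c : Char) (t : List Char) :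
    pvL (c :: t) =
      (if PySem.Chars.isalpha c = true then PySem.Chars.lowerChar c :: pvL t
       else if c = ' ' ∨ c = '-' ∨ c = '\n' then ' ' :: pvL t
       else pvL t) := by
  by_cases ha : PySem.Chars.isalpha c = true
  · have h1 : pvH c = c := by
      rw [pvH, if_neg]; rintro (h | h)
      exacts [isalpha_ne_hyphen ha h, isalpha_ne_newline ha h]
    simp [pvL, PySem.Chars.lower, h1, ha]
  · by_cases hs : c = ' ' ∨ c = '-' ∨ c = '\n'
    · have h1 : pvH c = ' ' := by
        rcases hs with h | h | h <;> subst h <;> simp [pvH]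
      have h2 : PySem.Chars.lowerChar ' ' = ' ' := rfl
      simp [pvL, PySem.Chars.lower, h1, ha, hs, h2]
    · push_neg at hs
      have h1 : pvH c = c := by
        rw [pvH, if_neg]; rintro (h | h); exacts [hs.2.1 h, hs.2.2 h]
      have h2 : (c == ' ') = false := by simp; exact hs.1
      simp [pvL, PySem.Chars.lower, h1, ha, h2]
      exact hs

-- B's fold computes acc ++ sqz b (pvL l)
theorem foldB_eq (l : List Char) : ∀ (acc : List Char) (b : Bool),
    (l.foldl
      (fun (st : List Char × Bool) ch =>
        if PySem.Chars.isalpha ch then (st.1 ++ [PySem.Chars.lowerChar ch], false)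
        else if ch == ' ' || ch == '-' || ch == '\n' then
          (if st.2 then st.1 else st.1 ++ [' '], true)
        else st)
      (acc, b)).1 = acc ++ sqz b (pvL l) := by
  induction l with
  | nil => intro acc b; simp [pvL, PySem.Chars.lower, sqz]
  | cons c t ih =>
    intro acc b
    rw [List.foldl_cons]
    by_cases ha : PySem.Chars.isalpha c = true
    · rw [if_pos ha, ih]
      rw [pvL_cons, if_pos ha]
      simp [sqz, lowerChar_ne_space ha]
    · rw [if_neg ha]
      by_cases hs : c = ' ' ∨ c = '-' ∨ c = '\n'
      · have hb : (c == ' ' || c == '-' || c == '\n') = true := by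
          rcases hs with h | h | h <;> subst h <;> simp
        rw [if_pos hb]
        rw [pvL_cons, if_neg ha, if_pos hs]
        cases b
        · rw [show (if (false : Bool) = true then acc else acc ++ [' ']) = acc ++ [' '] from rfl, ih]
          simp [sqz]
        · rw [show (if (true : Bool) = true then acc else acc ++ [' ']) = acc from rfl, ih]
          simp [sqz]
      · have hb : (c == ' ' || c == '-' || c == '\n') = false := by
          push_neg at hs
          simp [hs.1, hs.2.1, hs.2.2]
        rw [if_neg (by rw [hb]; simp), ih]
        rw [pvL_cons, if_neg ha, if_neg hs]

-- A's lowered filtered string equals ' ' :: pvL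
theorem pvA_fix (s : List Char) :
    PySem.Chars.lower
      ((PySem.Chars.replace (PySem.Chars.replace s ['-'] [' ']) ['\n'] [' ']).foldl
        (fun acc a => if PySem.Chars.isalpha a || a == ' ' then acc ++ [a] else acc) [' '])
      = ' ' :: pvL s := by
  rw [replace_single, replace_single, List.map_map]
  have hmap : ((fun x => if x = '\n' then ' ' else x) ∘ fun x => if x = '-' then ' ' else x)
      = pvH := by
    funext c
    by_cases h1 : c = '-'
    · subst h1; simp [pvH]
    · by_cases h2 : c = '\n'
      · subst h2; simp [pvH]
      · simp [pvH, h1, h2]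
  rw [hmap, PySem.List.foldl_append_if_eq_filter]
  have hsp : PySem.Chars.lowerChar ' ' = ' ' := rfl
  simp [pvL, PySem.Chars.lower, hsp]

-- ===== VERDICT (by name: the statement is the Claim_ definition above) =====
theorem textMarkup_spec : Claim_equal_textMarkup := by
  intro s _
  unfold Spec_textMarkup textMarkup textMarkup_alt
  simp only []
  rw [pvA_fix, collapseLoop_eq_sqz, foldB_eq]
  simp [sqz]
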